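-- pv_equiv track=rewrite | github.com/gcward18/leetcode | problems/dnaSequence.py | isAnagramByLetterRemoval
-- ===== SOURCE A (Python) =====
-- from collections import Counter
-- from collections import Counter
--
-- def isAnagramByLetterRemoval(s, t) -> bool:
--     extraInT = None
--     sCount = Counter(s)
--
--     for c in t:
--         if c in sCount:
--             if sCount[c] == 1:
--                 del sCount[c]
--             else:
--                 sCount[c] -= 1
--         elif extraInT and c != extraInT:
--             return False
--         else:
--             extraInT = c
--
--     return len(sCount) <= 1
-- ===== SOURCE B (Python) =====
-- from collections import Counter
--
-- def isAnagramByLetterRemoval(s, t) -> bool: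
--     sC = Counter(s)
--     tC = Counter(t)
--     extra = sum(1 for c in tC if tC[c] > sC[c])
--     deficit = sum(1 for c in sC if sC[c] > tC[c])
--     return extra <= 1 and deficit <= 1
-- ===== Notes on version B (the rewrite author's own statement) =====
-- stated objective: simpler
-- what changed: Replaces A's single mutating pass over t (decrementing/deleting a Counter of s while tracking one allowed extra character with an early return) by a non-mutating two-table comparison: build Counter(s) and Counter(t) once and count the distinct characters in surplus in each direction, returning extra <= 1 and deficit <= 1; the per-character work moves from a Python-level loop into C-level Counter construction.
import Mathlib
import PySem

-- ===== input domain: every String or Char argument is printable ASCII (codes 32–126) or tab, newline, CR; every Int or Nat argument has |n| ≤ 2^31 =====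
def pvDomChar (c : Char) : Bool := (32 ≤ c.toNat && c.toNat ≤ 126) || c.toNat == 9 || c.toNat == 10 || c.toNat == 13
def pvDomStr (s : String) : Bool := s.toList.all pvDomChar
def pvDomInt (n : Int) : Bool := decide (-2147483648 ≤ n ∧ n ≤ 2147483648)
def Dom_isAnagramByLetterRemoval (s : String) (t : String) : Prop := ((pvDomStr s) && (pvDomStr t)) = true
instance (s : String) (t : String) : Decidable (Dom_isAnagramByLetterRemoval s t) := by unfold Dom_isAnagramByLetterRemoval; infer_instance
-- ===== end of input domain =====

-- B replaces A's mutating single pass over t (decrement/delete a Counter of s plus an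
-- extra-character sentinel with early return) by a symmetric two-Counter surplus count (simpler; measured faster in a timing run).


-- ===== PORT A =====
-- the 'for c in t' loop: state = (sCount, extraInT); 'none' = the early 'return False'
def loopA (d : PySem.Dict Char Int) (extraInT : Option Char) :
    List Char → Option (PySem.Dict Char Int × Option Char)
  | [] => some (d, extraInT)
  | c :: rest =>
    if d.contains c then
      if d.getD c 0 == 1 then loopA (d.erase c) extraInT rest
      else loopA (d.insert c (d.getD c 0 - 1)) extraInT rest
    else
      match extraInT with
      | some e => if c == e then loopA d (some c) rest else none
      | none => loopA d (some c) rest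

def isAnagramByLetterRemoval (s : String) (t : String) : Bool :=
  match loopA (PySem.Dict.counter s.toList) none t.toList with
  | none => false
  | some (d, _) => decide (d.size ≤ 1)

-- ===== PORT B =====
def isAnagramByLetterRemoval_alt (s : String) (t : String) : Bool :=
  let sC := PySem.Dict.counter s.toList
  let tC := PySem.Dict.counter t.toList
  let extra := tC.keys.countP (fun c => decide (sC.getD c 0 < tC.getD c 0))
  let deficit := sC.keys.countP (fun c => decide (tC.getD c 0 < sC.getD c 0))
  decide (extra ≤ 1) && decide (deficit ≤ 1)

-- ===== PRECONDITION & SPEC =====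
def Spec_isAnagramByLetterRemoval (s : String) (t : String) (out : Bool) : Prop := out = isAnagramByLetterRemoval_alt s t
instance (s : String) (t : String) (out : Bool) : Decidable (Spec_isAnagramByLetterRemoval s t out) := by unfold Spec_isAnagramByLetterRemoval; infer_instance

-- ===== CLAIM (what is proved, stated in full; the proofs are below) =====
def Claim_equal_isAnagramByLetterRemoval : Prop := ∀ (s : String) (t : String), Dom_isAnagramByLetterRemoval s t → Spec_isAnagramByLetterRemoval s t (isAnagramByLetterRemoval s t)

-- ===== LEMMAS AND PROOFS =====

-- erase facts (not in the prelude): lookups away from the erased key, keys of erase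
lemma find?_filter_key (l : List (Char × Int)) (k x : Char) (h : x ≠ k) :
    (l.filter (fun p => !(p.1 == k))).find? (fun p => p.1 == x)
      = l.find? (fun p => p.1 == x) := by
  induction l with
  | nil => rfl
  | cons a l ih =>
    simp only [List.filter_cons]
    by_cases hk : a.1 = k
    · have hx : (a.1 == x) = false := by
        simp only [beq_eq_false_iff_ne, hk]; exact fun hxx => h hxx.symm
      rw [if_neg (by simp [hk]), ih, List.find?_cons, hx]
    · rw [if_pos (by simp [hk]), List.find?_cons, List.find?_cons]
      cases hax : (a.1 == x)
      · exact ih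
      · rfl

lemma getD_erase_of_ne (d : PySem.Dict Char Int) (k x : Char) (v : Int) (h : x ≠ k) :
    (d.erase k).getD x v = d.getD x v := by
  simp [PySem.Dict.erase, PySem.Dict.getD, PySem.Dict.get?, find?_filter_key d.items k x h]

lemma keys_erase (d : PySem.Dict Char Int) (k : Char) :
    (d.erase k).keys = d.keys.filter (fun a => !(a == k)) := by
  simp [PySem.Dict.erase, PySem.Dict.keys, List.filter_map]
  rfl

lemma mem_keys_erase (d : PySem.Dict Char Int) (k x : Char) :
    x ∈ (d.erase k).keys ↔ x ∈ d.keys ∧ x ≠ k := by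
  simp [keys_erase]

lemma nodup_keys_erase (d : PySem.Dict Char Int) (k : Char) (h : d.keys.Nodup) :
    (d.erase k).keys.Nodup := by
  rw [keys_erase]; exact h.filter _

-- two distinct members force length ≥ 2; all-equal members of a Nodup list force length ≤ 1
lemma two_le_length_of_mem_ne {l : List Char} {a b : Char}
    (ha : a ∈ l) (hb : b ∈ l) (hab : a ≠ b) : 2 ≤ l.length := by
  match l with
  | [] => simp at ha
  | [x] => simp at ha hb; exact absurd (ha.trans hb.symm) hab
  | x :: y :: l => simp

lemma length_le_one_of_forall_eq {l : List Char} (hnd : l.Nodup)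
    (h : ∀ a ∈ l, ∀ b ∈ l, a = b) : l.length ≤ 1 := by
  match l with
  | [] => simp
  | [x] => simp
  | x :: y :: l =>
    exact absurd (h x (by simp) y (by simp)) (by simp at hnd; tauto)

-- countP over a Nodup list = length of a Nodup key list with the matching membership
lemma countP_eq_length_of_mem_iff {l keys : List Char} {p : Char → Bool}
    (hnd : l.Nodup) (hk : keys.Nodup)
    (h : ∀ c, c ∈ keys ↔ (c ∈ l ∧ p c = true)) :
    l.countP p = keys.length := by
  rw [List.countP_eq_length_filter]
  refine (List.Perm.length_eq ?_).symm
  refine (List.perm_ext_iff_of_nodup hk (hnd.filter _)).2 ?_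
  intro c
  rw [h c, List.mem_filter]

-- the extraInT invariant: none = nothing consumed in excess; some e = e is the unique excess character
def ExInv (S p : List Char) : Option Char → Prop
  | none => ∀ c, p.count c ≤ S.count c
  | some e => S.count e < p.count e ∧ ∀ c, S.count c < p.count c → c = e

-- the loop invariant: after consuming prefix p (no early return yet), the dict holds exactly the
-- not-yet-exhausted characters of s, and extraInT records the unique character consumed in excess
lemma loopA_inv (S : List Char) :
    ∀ (rest p : List Char) (d : PySem.Dict Char Int) (extra : Option Char),
    d.keys.Nodup →
    (∀ c, c ∈ d.keys ↔ p.count c < S.count c) →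
    (∀ c, c ∈ d.keys → d.getD c 0 = (S.count c : Int) - (p.count c : Int)) →
    ExInv S p extra →
    (match loopA d extra rest with
     | none => ∃ a b, a ≠ b ∧ S.count a < (p ++ rest).count a ∧ S.count b < (p ++ rest).count b
     | some (d', _) =>
         (∀ a b, S.count a < (p ++ rest).count a → S.count b < (p ++ rest).count b → a = b) ∧
         d'.keys.Nodup ∧ (∀ c, c ∈ d'.keys ↔ (p ++ rest).count c < S.count c)) := by
  intro rest
  induction rest with
  | nil =>
    intro p d extra hnd hmem hval hex
    simp only [loopA, List.append_nil]
    refine ⟨?_, hnd, hmem⟩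
    intro a b ha hb
    cases extra with
    | none => exact absurd ha (by simpa [ExInv] using hex a)
    | some e =>
      simp only [ExInv] at hex
      exact (hex.2 a ha).trans (hex.2 b hb).symm
  | cons c rest ih =>
    intro p d extra hnd hmem hval hex
    have hsplit : p ++ c :: rest = (p ++ [c]) ++ rest := by simp
    have hcnt : ∀ x, (p ++ [c]).count x = p.count x + if c = x then 1 else 0 := by
      intro x
      by_cases h : c = x <;>
        simp [List.count_append, h]
    have hstep : ∀ x, x ≠ c → ((p ++ [c]).count x = p.count x) := by
      intro x hx; rw [hcnt x, if_neg (fun h => hx h.symm)]; omega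
    have hmono : ∀ x, ((p ++ [c]).count x ≤ ((p ++ [c]) ++ rest).count x) := by
      intro x; exact (List.sublist_append_left (p ++ [c]) rest).count_le x
    rw [hsplit]
    simp only [loopA]
    by_cases hc : d.contains c = true
    · have hcm : c ∈ d.keys := (PySem.Dict.contains_iff_mem_keys d c).1 hc
      have hlt : p.count c < S.count c := (hmem c).1 hcm
      have hvc : d.getD c 0 = (S.count c : Int) - (p.count c : Int) := hval c hcm
      have hexkeep : ExInv S (p ++ [c]) extra := by
        cases extra with
        | none =>
          simp only [ExInv] at hex ⊢
          intro x
          have := hex x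
          by_cases hxc : x = c
          · subst hxc; rw [hcnt x, if_pos rfl]; omega
          · rw [hstep x hxc]; exact this
        | some e =>
          simp only [ExInv] at hex ⊢
          have hne : e ≠ c := fun h => by
            subst h; exact absurd hex.1 (by omega)
          refine ⟨by rw [hstep e hne]; exact hex.1, ?_⟩
          intro x hx
          by_cases hxc : x = c
          · subst hxc; rw [hcnt x, if_pos rfl] at hx; omega
          · exact hex.2 x (by rwa [hstep x hxc] at hx)
      rw [if_pos hc]
      by_cases h1 : d.getD c 0 = 1
      · -- del sCount[c] : the last copy of c is consumed, (p++[c]).count c = S.count c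
        have hone : S.count c = p.count c + 1 := by
          have h := hvc; rw [h1] at h; omega
        rw [if_pos (by simpa using h1)]
        refine ih (p ++ [c]) (d.erase c) extra (nodup_keys_erase d c hnd) ?_ ?_ hexkeep
        · intro x
          rw [mem_keys_erase, hmem x, hcnt x]
          by_cases hx : c = x
          · subst hx; simp; omega
          · have : x ≠ c := fun h => hx h.symm
            simp [hx, this]
        · intro x hx
          rw [mem_keys_erase] at hx
          rw [getD_erase_of_ne d c x 0 hx.2, hval x hx.1, hstep x hx.2]
      · -- sCount[c] -= 1
        have hge2 : p.count c + 2 ≤ S.count c := by omega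
        rw [if_neg (by simpa using h1)]
        refine ih (p ++ [c]) (d.insert c (d.getD c 0 - 1)) extra
          (PySem.Dict.nodup_keys_insert d c _ hnd) ?_ ?_ hexkeep
        · intro x
          rw [PySem.Dict.mem_keys_insert, hmem x, hcnt x]
          by_cases hx : x = c
          · subst hx; simp; omega
          · have : ¬ c = x := fun h => hx h.symm
            simp [hx, this]
        · intro x hx
          rw [PySem.Dict.getD_insert]
          by_cases hxc : x = c
          · subst hxc; rw [if_pos rfl, hvc, hcnt x, if_pos rfl]; push_cast; ring
          · rw [if_neg hxc, hstep x hxc]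
            exact hval x (by rw [PySem.Dict.mem_keys_insert] at hx; tauto)
    · -- c not in sCount : this occurrence of c is consumed in excess
      have hge : S.count c ≤ p.count c := by
        have hcm : c ∉ d.keys := fun h => hc ((PySem.Dict.contains_iff_mem_keys d c).2 h)
        have h2 : ¬ (p.count c < S.count c) := fun h => hcm ((hmem c).2 h)
        omega
      have hexc : S.count c < (p ++ [c]).count c := by rw [hcnt c, if_pos rfl]; omega
      have hkeys : ∀ x, x ∈ d.keys ↔ (p ++ [c]).count x < S.count x := by
        intro x
        by_cases hx : x = c
        · subst hx
          constructor
          · intro h; exact absurd ((hmem x).1 h) (by omega)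
          · intro h; omega
        · rw [hmem x, hstep x hx]
      have hvals : ∀ x, x ∈ d.keys →
          d.getD x 0 = (S.count x : Int) - ((p ++ [c]).count x : Int) := by
        intro x hx
        have hxc : x ≠ c := by
          intro h; subst h; exact absurd ((hmem x).1 hx) (by omega)
        rw [hstep x hxc]; exact hval x hx
      rw [if_neg hc]
      cases extra with
      | none =>
        simp only [ExInv] at hex
        have hnewex : ExInv S (p ++ [c]) (some c) := by
          simp only [ExInv]
          refine ⟨hexc, ?_⟩
          intro x hx
          by_cases hxc : x = c
          · exact hxc
          · rw [hstep x hxc] at hx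
            exact absurd hx (by have := hex x; omega)
        exact ih (p ++ [c]) d (some c) hnd hkeys hvals hnewex
      | some e =>
        simp only [ExInv] at hex
        simp only []
        by_cases hce : c = e
        · rw [if_pos (by simpa using hce)]
          -- extra stays the single excess character (now recorded as c = e)
          have hnewex : ExInv S (p ++ [c]) (some c) := by
            simp only [ExInv]
            refine ⟨hexc, ?_⟩
            intro x hx
            by_cases hxc : x = c
            · exact hxc
            · rw [hstep x hxc] at hx
              exact (hex.2 x hx).trans hce.symm
          exact ih (p ++ [c]) d (some c) hnd hkeys hvals hnewex
        · rw [if_neg (by simpa using hce)]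
          -- early 'return False': both e and c are in excess in the whole of t
          refine ⟨c, e, hce, ?_, ?_⟩
          · exact lt_of_lt_of_le hexc (hmono c)
          · have he : S.count e < (p ++ [c]).count e := by
              rw [hstep e (fun h => hce h.symm)]; exact hex.1
            exact lt_of_lt_of_le he (hmono e)

-- characterisation of B's two surplus counts
lemma extra_count (S T : List Char) :
    (PySem.Dict.counter T).keys.countP
        (fun c => decide ((PySem.Dict.counter S).getD c 0 < (PySem.Dict.counter T).getD c 0))
      = (PySem.Set.ofList T).countP (fun c => decide (S.count c < T.count c)) := by
  rw [PySem.Dict.keys_counter]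
  apply List.countP_congr
  intro c _
  simp [PySem.Dict.getD_counter]

lemma deficit_count (S T : List Char) :
    (PySem.Dict.counter S).keys.countP
        (fun c => decide ((PySem.Dict.counter T).getD c 0 < (PySem.Dict.counter S).getD c 0))
      = (PySem.Set.ofList S).countP (fun c => decide (T.count c < S.count c)) := by
  rw [PySem.Dict.keys_counter]
  apply List.countP_congr
  intro c _
  simp [PySem.Dict.getD_counter]

-- ===== VERDICT (by name: the statement is the Claim_ definition above) =====
theorem isAnagramByLetterRemoval_spec : Claim_equal_isAnagramByLetterRemoval := by
  intro s t _
  unfold Spec_isAnagramByLetterRemoval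
  have hinv := loopA_inv s.toList t.toList [] (PySem.Dict.counter s.toList) none
    (PySem.Dict.nodup_keys_counter s.toList)
    (by
      intro c
      rw [PySem.Dict.keys_counter, PySem.Set.mem_ofList]
      simp [List.count_pos_iff])
    (by
      intro c _
      simp [PySem.Dict.getD_counter])
    (by simp only [ExInv]; intro c; simp)
  simp only [List.nil_append] at hinv
  simp only [isAnagramByLetterRemoval, isAnagramByLetterRemoval_alt]
  rw [extra_count s.toList t.toList, deficit_count s.toList t.toList]
  cases hA : loopA (PySem.Dict.counter s.toList) none t.toList with
  | none =>
    rw [hA] at hinv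
    obtain ⟨a, b, hab, ha, hb⟩ := hinv
    have h2 : 2 ≤ (PySem.Set.ofList t.toList).countP
        (fun c => decide (s.toList.count c < t.toList.count c)) := by
      rw [List.countP_eq_length_filter]
      refine two_le_length_of_mem_ne (a := a) (b := b) ?_ ?_ hab
      · rw [List.mem_filter, PySem.Set.mem_ofList]
        exact ⟨List.count_pos_iff.1 (by omega), by simpa using ha⟩
      · rw [List.mem_filter, PySem.Set.mem_ofList]
        exact ⟨List.count_pos_iff.1 (by omega), by simpa using hb⟩
    simp only [Bool.false_eq, Bool.and_eq_false_iff, decide_eq_false_iff_not]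
    left; omega
  | some v =>
    obtain ⟨d', extra'⟩ := v
    rw [hA] at hinv
    obtain ⟨huniq, hnd', hmem'⟩ := hinv
    have hextra : (PySem.Set.ofList t.toList).countP
        (fun c => decide (s.toList.count c < t.toList.count c)) ≤ 1 := by
      rw [List.countP_eq_length_filter]
      refine length_le_one_of_forall_eq ((PySem.Set.nodup_ofList t.toList).filter _) ?_
      intro a ha b hb
      rw [List.mem_filter] at ha hb
      exact huniq a b (by simpa using ha.2) (by simpa using hb.2)
    have hsize : d'.size = (PySem.Set.ofList s.toList).countP
        (fun c => decide (t.toList.count c < s.toList.count c)) := by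
      have h : (PySem.Set.ofList s.toList).countP
          (fun c => decide (t.toList.count c < s.toList.count c)) = d'.keys.length := by
        refine countP_eq_length_of_mem_iff (PySem.Set.nodup_ofList s.toList) hnd' ?_
        intro c
        rw [hmem', PySem.Set.mem_ofList, decide_eq_true_iff]
        constructor
        · intro h; exact ⟨List.count_pos_iff.1 (by omega), h⟩
        · exact And.right
      rw [h]
      simp [PySem.Dict.size, PySem.Dict.keys]
    show decide (d'.size ≤ 1) = _
    rw [hsize]
    simp [hextra]
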